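-- pv_equiv track=rewrite | github.com/GitMonsters/octotetrahedral-agi | arc-puzzle-catalog/re-arc/solves/3e970689/solver.py | _block_skeleton
-- ===== SOURCE A (Python) =====
-- def _block_skeleton(crop, color, bg):
--     h = len(crop)
--     w = len(crop[0])
--     out = [[bg for _ in range(w)] for _ in range(h)]
--     blocks = []
--     for r in range(h - 1):
--         for c in range(w - 1):
--             if crop[r][c] == crop[r + 1][c] == crop[r][c + 1] == crop[r + 1][c + 1] == color:
--                 blocks.append((r, c))
--     if blocks:
--         r, c = max(blocks, key=lambda rc: (rc[1], -rc[0]))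
--         out[r][c] = color
--         out[r + 1][c] = color
--         out[r][c + 1] = color
--         out[r + 1][c + 1] = color
--     left_cols = [c for c in range(w) if any(crop[r][c] == color for r in range(h))]
--     if left_cols:
--         c = left_cols[0]
--         rows = [r for r in range(h) if crop[r][c] == color]
--         out[rows[0]][c] = color
--         out[rows[-1]][c] = color
--     return out
-- ===== SOURCE B (Python) =====
-- def _block_skeleton(crop, color, bg):
--     h = len(crop)
--     w = len(crop[0])
--     out = [[bg] * w for _ in range(h)]
--     # 2x2 block: scan columns right-to-left, rows top-to-bottom; the first hit
--     # is the block with the largest column and, within it, the smallest row.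
--     for c in range(w - 2, -1, -1):
--         hit = next((r for r in range(h - 1)
--                     if crop[r][c] == crop[r + 1][c] == crop[r][c + 1] == crop[r + 1][c + 1] == color), None)
--         if hit is not None:
--             out[hit][c] = color
--             out[hit + 1][c] = color
--             out[hit][c + 1] = color
--             out[hit + 1][c + 1] = color
--             break
--     # leftmost column containing color: stamp its first and last color cells
--     for c in range(w):
--         if any(crop[r][c] == color for r in range(h)):
--             first = next(r for r in range(h) if crop[r][c] == color)
--             last = next(r for r in range(h - 1, -1, -1) if crop[r][c] == color)
--             out[first][c] = color
--             out[last][c] = color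
--             break
--     return out
-- ===== Notes on version B (the rewrite author's own statement) =====
-- stated objective: alternative
-- what changed: Instead of materializing the list of all 2x2 block positions and taking max(key=(c,-r)), B scans columns right-to-left (rows top-down within a column) and stamps the first hit; instead of building the left_cols and rows lists, B finds the first column containing the color and its first/last color rows by direct early-exit scans.
-- outside the precondition, e.g. on _block_skeleton([[2, 1], [1]], 1, 0): A returns [[0, 0], [1, 0]], B returns [[0, 0], [1, 0]]
import Mathlib
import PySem

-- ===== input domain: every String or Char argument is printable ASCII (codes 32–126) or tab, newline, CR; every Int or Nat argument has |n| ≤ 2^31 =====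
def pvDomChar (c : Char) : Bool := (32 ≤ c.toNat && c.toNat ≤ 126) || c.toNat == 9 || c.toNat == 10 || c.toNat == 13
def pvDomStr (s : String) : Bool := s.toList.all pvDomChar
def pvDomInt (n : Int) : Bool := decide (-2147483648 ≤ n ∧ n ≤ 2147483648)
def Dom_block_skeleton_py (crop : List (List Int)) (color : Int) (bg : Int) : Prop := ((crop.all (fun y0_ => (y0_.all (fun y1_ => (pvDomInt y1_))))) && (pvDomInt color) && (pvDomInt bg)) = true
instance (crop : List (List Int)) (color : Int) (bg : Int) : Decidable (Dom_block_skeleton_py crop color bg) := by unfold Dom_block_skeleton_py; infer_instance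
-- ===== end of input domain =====

-- B replaces A's materialized blocks list + max(key=(c,-r)) and the left_cols/rows lists by
-- direct early-exit searches (right-to-left column scan for the 2x2 block, first/last row
-- scans for the leftmost colored column); same return value, no speed claim.

-- ===== PORT A =====
-- crop[r][c]; exact where 0 ≤ r < len crop and 0 ≤ c < len (crop[r]) — true at every use under Pre_
def pvCell (crop : List (List Int)) (r c : Int) : Int :=
  PySem.List.pyGetD (PySem.List.pyGetD crop r []) c 0

-- out[r][c] = v; exact for the in-range nonnegative indices used here
def pvSet2 (g : List (List Int)) (r c : Int) (v : Int) : List (List Int) :=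
  g.set r.toNat ((g.getD r.toNat []).set c.toNat v)

-- the chained test crop[r][c] == crop[r+1][c] == crop[r][c+1] == crop[r+1][c+1] == color (both Pythons)
def pvBlockAt (crop : List (List Int)) (color : Int) (r c : Int) : Bool :=
  pvCell crop r c == color && pvCell crop (r + 1) c == color &&
  pvCell crop r (c + 1) == color && pvCell crop (r + 1) (c + 1) == color

-- out = [[bg for _ in range(w)] for _ in range(h)]
def pvOutInitA (h w bg : Int) : List (List Int) :=
  (PySem.List.pyRange 0 h 1).map (fun _ => (PySem.List.pyRange 0 w 1).map (fun _ => bg))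

-- the blocks-collecting double loop
def pvBlocksA (crop : List (List Int)) (color h w : Int) : List (Int × Int) :=
  (PySem.List.pyRange 0 (h - 1) 1).foldl (fun acc r =>
    (PySem.List.pyRange 0 (w - 1) 1).foldl (fun acc c =>
      if pvBlockAt crop color r c then acc ++ [(r, c)] else acc) acc) []

-- 'if blocks: r, c = max(blocks, key=lambda rc: (rc[1], -rc[0])); out[...] = color (4 cells)'
def pvPart1A (crop : List (List Int)) (color bg h w : Int) : List (List Int) :=
  if pvBlocksA crop color h w ≠ [] then
    match PySem.List.max2? (pvBlocksA crop color h w) (fun rc => rc.2) (fun rc => -rc.1) with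
    | some (r, c) =>
        pvSet2 (pvSet2 (pvSet2 (pvSet2 (pvOutInitA h w bg) r c color) (r + 1) c color)
          r (c + 1) color) (r + 1) (c + 1) color
    | none => pvOutInitA h w bg
  else pvOutInitA h w bg

-- any(crop[r][c] == color for r in range(h))
def pvAnyColorA (crop : List (List Int)) (color h c : Int) : Bool :=
  (PySem.List.pyRange 0 h 1).any (fun r => pvCell crop r c == color)

-- left_cols = [c for c in range(w) if any(...)]
def pvLeftColsA (crop : List (List Int)) (color h w : Int) : List Int :=
  (PySem.List.pyRange 0 w 1).filter (fun c => pvAnyColorA crop color h c)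

-- rows = [r for r in range(h) if crop[r][c] == color]
def pvRowsA (crop : List (List Int)) (color h c : Int) : List Int :=
  (PySem.List.pyRange 0 h 1).filter (fun r => pvCell crop r c == color)

def block_skeleton_py (crop : List (List Int)) (color : Int) (bg : Int) : List (List Int) :=
  let h : Int := crop.length
  let w : Int := (PySem.List.pyGetD crop 0 []).length
  let out1 := pvPart1A crop color bg h w
  let left_cols := pvLeftColsA crop color h w
  if left_cols ≠ [] then
    let c := left_cols.headD 0
    let rows := pvRowsA crop color h c
    pvSet2 (pvSet2 out1 (PySem.List.pyGetD rows 0 0) c color) (PySem.List.pyGetD rows (-1) 0) c color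
  else out1

-- ===== PORT B =====
-- next((r for r in range(h-1) if <2x2 block at (r,c)>), None)
def pvRowHitB (crop : List (List Int)) (color : Int) (h c : Nat) : Option Nat :=
  (List.range (h - 1)).find? (fun r : Nat => pvBlockAt crop color (r : Int) (c : Int))

-- 'for c in range(w-2, -1, -1): ... break' — fuel n scans columns n-1, n-2, …, 0
def pvScanBlockB (crop : List (List Int)) (color : Int) (h : Nat) : Nat → Option (Nat × Nat)
  | 0 => none
  | c + 1 =>
    match pvRowHitB crop color h c with
    | some r => some (r, c)
    | none => pvScanBlockB crop color h c

-- any(crop[r][c] == color for r in range(h))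
def pvColHasB (crop : List (List Int)) (color : Int) (h c : Nat) : Bool :=
  (List.range h).any (fun r : Nat => pvCell crop (r : Int) (c : Int) == color)

def block_skeleton_py_alt (crop : List (List Int)) (color : Int) (bg : Int) : List (List Int) :=
  let h := crop.length
  let w := (crop.headD []).length
  let out0 : List (List Int) := List.replicate h (List.replicate w bg)
  let out1 :=
    match pvScanBlockB crop color h (w - 1) with
    | some (r, c) =>
        pvSet2 (pvSet2 (pvSet2 (pvSet2 out0 (r : Int) (c : Int) color) ((r : Int) + 1) (c : Int) color)
          (r : Int) ((c : Int) + 1) color) ((r : Int) + 1) ((c : Int) + 1) color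
    | none => out0
  match (List.range w).find? (fun c : Nat => pvColHasB crop color h c) with
  | some c =>
    let first : Nat := ((List.range h).find? (fun r : Nat => pvCell crop (r : Int) (c : Int) == color)).getD 0
    let last : Nat := ((List.range h).reverse.find? (fun r : Nat => pvCell crop (r : Int) (c : Int) == color)).getD 0
    pvSet2 (pvSet2 out1 (first : Int) (c : Int) color) (last : Int) (c : Int) color
  | none => out1

-- ===== PRECONDITION & SPEC =====
-- Pre_ excludes the inputs where Python A raises an IndexError: the empty crop (crop[0]) and
-- ragged crops in which some row is shorter than row 0; on a few such ragged crops A still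
-- returns because any()/chained-== short-circuit before the missing cell, and B returns the
-- same value there (see the cite in claim.json).
def Pre_block_skeleton_py (crop : List (List Int)) (color : Int) (bg : Int) : Prop :=
  crop ≠ [] ∧ ∀ row ∈ crop, (crop.headD []).length ≤ row.length
instance (crop : List (List Int)) (color : Int) (bg : Int) : Decidable (Pre_block_skeleton_py crop color bg) := by unfold Pre_block_skeleton_py; infer_instance
def pvWitness_block_skeleton_py : List (List Int) × Int × Int := ([[1, 1], [1, 1]], 1, 0)

def Spec_block_skeleton_py (crop : List (List Int)) (color : Int) (bg : Int) (out : List (List Int)) : Prop := out = block_skeleton_py_alt crop color bg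
instance (crop : List (List Int)) (color : Int) (bg : Int) (out : List (List Int)) : Decidable (Spec_block_skeleton_py crop color bg out) := by unfold Spec_block_skeleton_py; infer_instance

-- ===== CLAIM (what is proved, stated in full; the proofs are below) =====
def Claim_equal_block_skeleton_py : Prop := ∀ (crop : List (List Int)) (color : Int) (bg : Int), Dom_block_skeleton_py crop color bg → Pre_block_skeleton_py crop color bg → Spec_block_skeleton_py crop color bg (block_skeleton_py crop color bg)

-- ===== LEMMAS AND PROOFS =====

-- pyGetD at index 0 is headD
lemma pv_pyGetD_zero {α : Type} (xs : List α) (d : α) : PySem.List.pyGetD xs 0 d = xs.headD d := by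
  cases xs <;> simp [PySem.List.pyGetD, PySem.List.pyGet?, PySem.List.pyIdx?]

-- pyGetD at index -1 is getLastD on a nonempty list
lemma pv_pyGetD_neg_one {α : Type} (xs : List α) (d : α) (h : xs ≠ []) :
    PySem.List.pyGetD xs (-1) d = xs.getLastD d := by
  have hl : 1 ≤ xs.length := by
    cases xs with
    | nil => exact absurd rfl h
    | cons a t => simp
  simp [PySem.List.pyGetD, PySem.List.pyGet?, PySem.List.pyIdx?, hl,
    List.getLastD_eq_getLast?, List.getLast?_eq_getElem?]

-- range(0, a) over Int is the casted List.range
lemma pv_pyRange_cast (a : Int) :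
    PySem.List.pyRange 0 a 1 = (List.range a.toNat).map (fun k : Nat => (k : Int)) := by
  rw [PySem.List.pyRange_one]
  simp only [Int.sub_zero]
  exact List.map_inj_left.mpr (fun k _ => by omega)

lemma pv_outInit_eq (h w : Nat) (bg : Int) :
    pvOutInitA (h : Int) (w : Int) bg = List.replicate h (List.replicate w bg) := by
  unfold pvOutInitA
  rw [pv_pyRange_cast, pv_pyRange_cast]
  simp [List.map_map, Function.comp_def, List.map_const']

-- the blocks list, normalized
def pvBlocksN (crop : List (List Int)) (color : Int) (h w : Nat) : List (Int × Int) :=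
  (List.range (h - 1)).flatMap (fun r : Nat =>
    ((List.range (w - 1)).filter (fun c : Nat => pvBlockAt crop color (r : Int) (c : Int))).map
      (fun c : Nat => ((r : Int), (c : Int))))

lemma pv_blocksA_eq (crop : List (List Int)) (color : Int) (h w : Nat) :
    pvBlocksA crop color (h : Int) (w : Int) = pvBlocksN crop color h w := by
  unfold pvBlocksA pvBlocksN
  simp only [PySem.List.foldl_append_if, PySem.List.foldl_append_eq_flatMap, List.nil_append]
  rw [pv_pyRange_cast, pv_pyRange_cast]
  have h1 : ((h : Int) - 1).toNat = h - 1 := by omega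
  have h2 : ((w : Int) - 1).toNat = w - 1 := by omega
  rw [h1, h2, List.flatMap_map]
  congr 1
  funext r
  rw [List.filter_map, List.map_map]
  rfl

lemma pv_mem_blocksN (crop : List (List Int)) (color : Int) (h w : Nat) (p : Int × Int) :
    p ∈ pvBlocksN crop color h w ↔
      ∃ r c : Nat, r < h - 1 ∧ c < w - 1 ∧ pvBlockAt crop color (r : Int) (c : Int) = true ∧
        p = ((r : Int), (c : Int)) := by
  simp only [pvBlocksN, List.mem_flatMap, List.mem_map, List.mem_filter, List.mem_range]
  constructor
  · rintro ⟨r, hr, c, ⟨hc, hP⟩, rfl⟩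
    exact ⟨r, c, hr, hc, hP, rfl⟩
  · rintro ⟨r, c, hr, hc, hP, rfl⟩
    exact ⟨r, hr, c, ⟨hc, hP⟩, rfl⟩

-- find? on a strictly increasing list rejects everything below its result
lemma pv_find?_min {l : List Nat} (hl : l.Pairwise (· < ·)) {p : Nat → Bool} {r : Nat}
    (h : l.find? p = some r) : ∀ r' ∈ l, r' < r → p r' = false := by
  induction l with
  | nil => simp at h
  | cons a t ih =>
    rcases List.pairwise_cons.mp hl with ⟨ha, ht⟩
    by_cases hpa : p a
    · rw [List.find?_cons_of_pos hpa] at h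
      obtain rfl : a = r := Option.some.inj h
      intro r' hr' hlt
      rcases List.mem_cons.mp hr' with rfl | hmem
      · exact absurd hlt (lt_irrefl r')
      · exact absurd hlt (not_lt.mpr (le_of_lt (ha r' hmem)))
    · rw [List.find?_cons_of_neg (by simpa using hpa)] at h
      intro r' hr' hlt
      rcases List.mem_cons.mp hr' with rfl | hmem
      · simpa using hpa
      · exact ih ht h r' hmem hlt

lemma pv_find?_range_some {m r : Nat} {p : Nat → Bool} (h : (List.range m).find? p = some r) :
    r < m ∧ p r = true ∧ ∀ r' < r, p r' = false := by
  have hmem := List.mem_range.mp (List.mem_of_find?_eq_some h)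
  refine ⟨hmem, List.find?_some h, fun r' hlt => ?_⟩
  exact pv_find?_min List.pairwise_lt_range h r' (List.mem_range.mpr (by omega)) hlt

lemma pv_find?_range_none {m : Nat} {p : Nat → Bool} (h : (List.range m).find? p = none) :
    ∀ r < m, p r = false := by
  intro r hr
  have := List.find?_eq_none.mp h r (List.mem_range.mpr hr)
  simpa using this

lemma pv_scan_none_iff (crop : List (List Int)) (color : Int) (hh : Nat) (n : Nat) :
    pvScanBlockB crop color hh n = none ↔
      ∀ c < n, ∀ r < hh - 1, pvBlockAt crop color (r : Int) (c : Int) = false := by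
  induction n with
  | zero =>
    constructor
    · intro _ c hc
      exact absurd hc (Nat.not_lt_zero c)
    · intro _; rfl
  | succ n ih =>
    have hunf : pvScanBlockB crop color hh (n + 1)
        = (match pvRowHitB crop color hh n with
           | some r => some (r, n)
           | none => pvScanBlockB crop color hh n) := rfl
    cases hfind : pvRowHitB crop color hh n with
    | some r =>
      rw [hunf, hfind]
      simp only [reduceCtorEq, false_iff]
      intro hall
      have hfind' := hfind
      unfold pvRowHitB at hfind'
      obtain ⟨hrlt, hp, -⟩ := pv_find?_range_some hfind'
      have hpb : pvBlockAt crop color (r : Int) (n : Int) = true := hp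
      simp [hall n (Nat.lt_succ_self n) r hrlt] at hpb
    | none =>
      rw [hunf, hfind, ih]
      have hfind' := hfind
      unfold pvRowHitB at hfind'
      have hnone := pv_find?_range_none hfind'
      constructor
      · intro hall c hc r hr
        rcases Nat.lt_succ_iff_lt_or_eq.mp hc with hc' | rfl
        · exact hall c hc' r hr
        · exact hnone r hr
      · intro hall c hc r hr
        exact hall c (by omega) r hr

lemma pv_scan_some (crop : List (List Int)) (color : Int) (hh : Nat) :
    ∀ n {r c : Nat}, pvScanBlockB crop color hh n = some (r, c) →
      c < n ∧ r < hh - 1 ∧ pvBlockAt crop color (r : Int) (c : Int) = true ∧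
      (∀ r' < r, pvBlockAt crop color (r' : Int) (c : Int) = false) ∧
      (∀ c', c < c' → c' < n → ∀ r' < hh - 1, pvBlockAt crop color (r' : Int) (c' : Int) = false) := by
  intro n
  induction n with
  | zero =>
    intro r c h
    rw [show pvScanBlockB crop color hh 0 = none from rfl] at h
    exact absurd h (by simp)
  | succ n ih =>
    intro r c h
    have hunf : pvScanBlockB crop color hh (n + 1)
        = (match pvRowHitB crop color hh n with
           | some r => some (r, n)
           | none => pvScanBlockB crop color hh n) := rfl
    cases hfind : pvRowHitB crop color hh n with
    | some r0 =>
      rw [hunf, hfind] at h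
      simp only [Option.some.injEq, Prod.mk.injEq] at h
      obtain ⟨rfl, rfl⟩ := h
      have hfind' := hfind
      unfold pvRowHitB at hfind'
      obtain ⟨hr, hp, hmin⟩ := pv_find?_range_some hfind'
      exact ⟨Nat.lt_succ_self _, hr, hp, fun r' h' => hmin r' h',
        fun c' hc1 hc2 => absurd hc2 (by omega)⟩
    | none =>
      rw [hunf, hfind] at h
      obtain ⟨hc, hr, hp, hmin, hdom⟩ := ih h
      have hfind' := hfind
      unfold pvRowHitB at hfind'
      have hnone := pv_find?_range_none hfind'
      refine ⟨by omega, hr, hp, hmin, fun c' hc1 hc2 r' hr' => ?_⟩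
      rcases Nat.lt_succ_iff_lt_or_eq.mp hc2 with hc' | rfl
      · exact hdom c' hc1 hc' r' hr'
      · exact hnone r' hr'

-- Python's max(..., key=lambda rc: (rc[1], -rc[0])) as a fold (the body of PySem.List.max2?)
def pvStep (acc : Option (Int × Int)) (x : Int × Int) : Option (Int × Int) :=
  match acc with
  | none => some x
  | some m => if (decide (m.2 < x.2) || !decide (x.2 < m.2) && decide (-m.1 < -x.1)) = true then some x else some m

lemma pv_max2?_eq_foldl (xs : List (Int × Int)) :
    PySem.List.max2? xs (fun rc => rc.2) (fun rc => -rc.1) = xs.foldl pvStep none := by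
  unfold PySem.List.max2?
  congr 1
  funext acc x
  cases acc <;> rfl

-- the strict order of the keys (c, -r)
abbrev pvLt (y m : Int × Int) : Prop := y.2 < m.2 ∨ (y.2 = m.2 ∧ m.1 < y.1)

lemma pv_step_lt (m x : Int × Int) :
    pvStep (some m) x = if pvLt m x then some x else some m := by
  have hiff : ((decide (m.2 < x.2) || !decide (x.2 < m.2) && decide (-m.1 < -x.1)) = true) ↔ pvLt m x := by
    simp only [pvLt, Bool.or_eq_true, Bool.and_eq_true, Bool.not_eq_true', decide_eq_true_eq,
      decide_eq_false_iff_not]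
    omega
  simp only [pvStep]
  by_cases h : pvLt m x
  · rw [if_pos (hiff.mpr h), if_pos h]
  · rw [if_neg (fun hc => h (hiff.mp hc)), if_neg h]

lemma pv_keep (xs : List (Int × Int)) (m : Int × Int)
    (hd : ∀ y ∈ xs, pvLt y m ∨ y = m) : xs.foldl pvStep (some m) = some m := by
  induction xs with
  | nil => rfl
  | cons x t ih =>
    have hx := hd x (by simp)
    have hneg : ¬ pvLt m x := by
      intro hmx
      rcases hx with hlt | rfl
      · unfold pvLt at hlt hmx; omega
      · unfold pvLt at hmx; omega
    rw [List.foldl_cons, pv_step_lt, if_neg hneg]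
    exact ih (fun y hy => hd y (by simp [hy]))

lemma pv_reach (xs : List (Int × Int)) : ∀ b m : Int × Int, m ∈ xs →
    (∀ y ∈ xs, pvLt y m ∨ y = m) → pvLt b m → xs.foldl pvStep (some b) = some m := by
  induction xs with
  | nil => intro b m hm _ _; simp at hm
  | cons x t ih =>
    intro b m hm hd hb
    have hdt : ∀ y ∈ t, pvLt y m ∨ y = m := fun y hy => hd y (by simp [hy])
    rw [List.foldl_cons, pv_step_lt]
    by_cases hc : pvLt b x
    · rw [if_pos hc]
      rcases hd x (by simp) with hx | rfl
      · rcases List.mem_cons.mp hm with rfl | hmt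
        · exact absurd hx (by unfold pvLt; omega)
        · exact ih x m hmt hdt hx
      · exact pv_keep t x hdt
    · rw [if_neg hc]
      rcases List.mem_cons.mp hm with rfl | hmt
      · exact absurd hb hc
      · exact ih b m hmt hdt hb

lemma pv_max2?_unique (xs : List (Int × Int)) (m : Int × Int) (hm : m ∈ xs)
    (hd : ∀ y ∈ xs, pvLt y m ∨ y = m) :
    PySem.List.max2? xs (fun rc => rc.2) (fun rc => -rc.1) = some m := by
  rw [pv_max2?_eq_foldl]
  cases xs with
  | nil => simp at hm
  | cons x t =>
    have hdt : ∀ y ∈ t, pvLt y m ∨ y = m := fun y hy => hd y (by simp [hy])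
    show List.foldl pvStep (some x) t = some m
    rcases List.mem_cons.mp hm with rfl | hmt
    · exact pv_keep t m hdt
    · rcases hd x (by simp) with hx | rfl
      · exact pv_reach t x m hmt hdt hx
      · exact pv_keep t x hdt

-- the first hit of B's right-to-left scan is exactly Python's max(blocks, key=(c, -r))
lemma pv_max_eq_scan (crop : List (List Int)) (color : Int) (h w : Nat) :
    PySem.List.max2? (pvBlocksN crop color h w) (fun rc => rc.2) (fun rc => -rc.1)
      = (pvScanBlockB crop color h (w - 1)).map (fun p => ((p.1 : Int), (p.2 : Int))) := by
  cases hscan : pvScanBlockB crop color h (w - 1) with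
  | none =>
    have hall := (pv_scan_none_iff crop color h (w - 1)).mp hscan
    have hnil : pvBlocksN crop color h w = [] := by
      rw [List.eq_nil_iff_forall_not_mem]
      intro p hp
      obtain ⟨r, c, hr, hc, hP, rfl⟩ := (pv_mem_blocksN crop color h w p).mp hp
      have := hall c hc r hr
      rw [this] at hP
      cases hP
    rw [hnil]
    rfl
  | some rc =>
    obtain ⟨r, c⟩ := rc
    obtain ⟨hc, hr, hP, hmin, hdom⟩ := pv_scan_some crop color h (w - 1) hscan
    simp only [Option.map_some]
    apply pv_max2?_unique
    · exact (pv_mem_blocksN crop color h w _).mpr ⟨r, c, hr, hc, hP, rfl⟩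
    · intro y hy
      obtain ⟨r', c', hr', hc', hP', rfl⟩ := (pv_mem_blocksN crop color h w y).mp hy
      rcases Nat.lt_trichotomy c' c with hlt | rfl | hgt
      · left; left
        show (c' : Int) < (c : Int)
        exact_mod_cast hlt
      · rcases Nat.lt_trichotomy r' r with hlt | rfl | hgt
        · have := hmin r' hlt
          rw [this] at hP'
          cases hP'
        · right; rfl
        · left; right
          refine ⟨rfl, ?_⟩
          show (r : Int) < (r' : Int)
          exact_mod_cast hgt
      · have := hdom c' hgt hc' r' hr'
        rw [this] at hP'
        cases hP'

lemma pv_part1_eq (crop : List (List Int)) (color bg : Int) (h w : Nat) :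
    pvPart1A crop color bg (h : Int) (w : Int) =
      (match pvScanBlockB crop color h (w - 1) with
       | some (r, c) =>
           pvSet2 (pvSet2 (pvSet2 (pvSet2 (List.replicate h (List.replicate w bg)) (r : Int) (c : Int) color)
             ((r : Int) + 1) (c : Int) color) (r : Int) ((c : Int) + 1) color) ((r : Int) + 1) ((c : Int) + 1) color
       | none => List.replicate h (List.replicate w bg)) := by
  unfold pvPart1A
  rw [pv_blocksA_eq, pv_max_eq_scan, pv_outInit_eq]
  cases hscan : pvScanBlockB crop color h (w - 1) with
  | none =>
    have hnil : pvBlocksN crop color h w = [] := by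
      rw [List.eq_nil_iff_forall_not_mem]
      intro p hp
      obtain ⟨r, c, hr, hc, hP, rfl⟩ := (pv_mem_blocksN crop color h w p).mp hp
      have := (pv_scan_none_iff crop color h (w - 1)).mp hscan c hc r hr
      rw [this] at hP
      cases hP
    simp [hnil]
  | some rc =>
    obtain ⟨r, c⟩ := rc
    have hne : pvBlocksN crop color h w ≠ [] := by
      intro hnil
      have hmax := pv_max_eq_scan crop color h w
      rw [hnil, hscan, pv_max2?_eq_foldl] at hmax
      simp at hmax
    simp [hne]

lemma pv_leftCols_eq (crop : List (List Int)) (color : Int) (h w : Nat) :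
    pvLeftColsA crop color (h : Int) (w : Int) =
      ((List.range w).filter (fun c : Nat => pvColHasB crop color h c)).map (fun k : Nat => (k : Int)) := by
  unfold pvLeftColsA pvAnyColorA pvColHasB
  rw [pv_pyRange_cast, pv_pyRange_cast, List.filter_map]
  simp [List.any_map, Function.comp_def]

lemma pv_rows_eq (crop : List (List Int)) (color : Int) (h c : Nat) :
    pvRowsA crop color (h : Int) (c : Int) =
      ((List.range h).filter (fun r : Nat => pvCell crop (r : Int) (c : Int) == color)).map
        (fun k : Nat => (k : Int)) := by
  unfold pvRowsA
  rw [pv_pyRange_cast, List.filter_map]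
  rfl

theorem pv_main (crop : List (List Int)) (color : Int) (bg : Int) :
    block_skeleton_py crop color bg = block_skeleton_py_alt crop color bg := by
  simp only [block_skeleton_py, block_skeleton_py_alt]
  rw [pv_pyGetD_zero crop ([] : List Int)]
  rw [pv_part1_eq crop color bg crop.length (crop.headD []).length]
  rw [pv_leftCols_eq crop color crop.length (crop.headD []).length]
  cases hF : (List.range (crop.headD []).length).find? (fun c : Nat => pvColHasB crop color crop.length c) with
  | none =>
    have hFnil : (List.range (crop.headD []).length).filter (fun c : Nat => pvColHasB crop color crop.length c) = [] :=
      List.head?_eq_none_iff.mp (by rw [List.head?_filter, hF])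
    rw [hFnil, List.map_nil, if_neg (fun hco => hco rfl)]
  | some c0 =>
    have hhead : ((List.range (crop.headD []).length).filter (fun c : Nat => pvColHasB crop color crop.length c)).head? = some c0 := by
      rw [List.head?_filter, hF]
    have hFne : ((List.range (crop.headD []).length).filter (fun c : Nat => pvColHasB crop color crop.length c)) ≠ [] := by
      intro hnil; rw [hnil] at hhead; cases hhead
    have hmapne : (((List.range (crop.headD []).length).filter (fun c : Nat => pvColHasB crop color crop.length c)).map (fun k : Nat => (k : Int))) ≠ [] := by
      simpa using hFne
    have hheadD : (((List.range (crop.headD []).length).filter (fun c : Nat => pvColHasB crop color crop.length c)).map (fun k : Nat => (k : Int))).headD 0 = (c0 : Int) := by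
      rw [List.headD_eq_head?_getD, List.head?_map, hhead]
      rfl
    rw [if_pos hmapne, hheadD, pv_rows_eq crop color crop.length c0]
    have hfirst : ((((List.range crop.length).filter (fun r : Nat => pvCell crop (r : Int) (c0 : Int) == color)).map (fun k : Nat => (k : Int))).headD 0)
        = (((((List.range crop.length).find? (fun r : Nat => pvCell crop (r : Int) (c0 : Int) == color)).getD 0) : Nat) : Int) := by
      rw [List.headD_eq_head?_getD, List.head?_map, ← List.head?_filter]
      cases ((List.range crop.length).filter (fun r : Nat => pvCell crop (r : Int) (c0 : Int) == color)).head? <;> simp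
    have hlast : ((((List.range crop.length).filter (fun r : Nat => pvCell crop (r : Int) (c0 : Int) == color)).map (fun k : Nat => (k : Int))).getLastD 0)
        = (((((List.range crop.length).reverse.find? (fun r : Nat => pvCell crop (r : Int) (c0 : Int) == color)).getD 0) : Nat) : Int) := by
      rw [List.getLastD_eq_getLast?, List.getLast?_map, ← List.head?_reverse, ← List.filter_reverse,
        List.head?_filter]
      cases (List.range crop.length).reverse.find? (fun r : Nat => pvCell crop (r : Int) (c0 : Int) == color) <;> simp
    have hRmapne : (((List.range crop.length).filter (fun r : Nat => pvCell crop (r : Int) (c0 : Int) == color)).map (fun k : Nat => (k : Int))) ≠ [] := by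
      have hc0mem : c0 ∈ (List.range (crop.headD []).length).filter (fun c : Nat => pvColHasB crop color crop.length c) :=
        List.mem_filter.mpr ⟨List.mem_of_find?_eq_some hF, List.find?_some hF⟩
      have hc0p : pvColHasB crop color crop.length c0 = true := (List.mem_filter.mp hc0mem).2
      simp only [pvColHasB] at hc0p
      obtain ⟨r0, hr0mem, hr0p⟩ := List.any_eq_true.mp hc0p
      intro hnil
      have hr0 : r0 ∈ ((List.range crop.length).filter (fun r : Nat => pvCell crop (r : Int) (c0 : Int) == color)) :=
        List.mem_filter.mpr ⟨hr0mem, hr0p⟩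
      rw [List.map_eq_nil_iff.mp hnil] at hr0
      cases hr0
    rw [pv_pyGetD_zero, pv_pyGetD_neg_one _ _ hRmapne, hfirst, hlast]

-- ===== VERDICT (by name: the statement is the Claim_ definition above) =====
theorem block_skeleton_py_spec : Claim_equal_block_skeleton_py := by
  intro crop color bg _ _
  unfold Spec_block_skeleton_py
  exact pv_main crop color bg
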